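-- pv_equiv track=rewrite | github.com/neuralnomads-ai/neural-nomads | agents/design_critic.py | score_from_changes
-- ===== SOURCE A (Python) =====
-- def score_from_changes(changed):
--     score = 70
--     paths = [c["path"] for c in changed]
--     if any("/lore/" in p for p in paths):
--         score += 6
--     if any("/images" in p for p in paths):
--         score += 6
--     if any("/dist" in p for p in paths):
--         score += 4
--     return min(score, 92)
-- ===== SOURCE B (Python) =====
-- RULES = (("/lore/", 6), ("/images", 6), ("/dist", 4))
--
-- def score_from_changes(changed):
--     matched = set()
--     for c in changed:
--         p = c["path"]
--         for sub, _pts in RULES: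
--             if sub in p:
--                 matched.add(sub)
--         if len(matched) == len(RULES):
--             break
--     return min(70 + sum(pts for sub, pts in RULES if sub in matched), 92)
-- ===== Notes on version B (the rewrite author's own statement) =====
-- stated objective: alternative
-- what changed: A makes three independent any()-scans over a precomputed paths list; B is table-driven: it makes one pass over changed accumulating the set of rule substrings matched so far, terminates the scan early once every rule in the table has matched, and computes the score by summing the points of matched table entries.
import Mathlib
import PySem

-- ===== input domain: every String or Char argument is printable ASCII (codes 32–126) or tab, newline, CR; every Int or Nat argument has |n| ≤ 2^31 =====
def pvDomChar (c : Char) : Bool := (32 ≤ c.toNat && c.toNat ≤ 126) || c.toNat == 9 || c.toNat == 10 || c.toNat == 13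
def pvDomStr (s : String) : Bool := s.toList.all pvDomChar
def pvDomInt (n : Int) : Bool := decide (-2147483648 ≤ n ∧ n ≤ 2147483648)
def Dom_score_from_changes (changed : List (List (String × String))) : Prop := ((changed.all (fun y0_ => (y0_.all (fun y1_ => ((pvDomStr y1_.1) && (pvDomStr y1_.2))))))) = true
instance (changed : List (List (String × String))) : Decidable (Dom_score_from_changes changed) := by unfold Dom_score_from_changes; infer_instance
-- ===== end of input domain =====

-- B replaces A's three independent any()-scans over a precomputed paths list by a table-driven
-- single pass that accumulates the set of matched rule substrings, breaks early once every rule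
-- has matched, and scores by summing the points of matched table entries (alternative, same cost).


-- ===== PORT A =====
-- c["path"]: first-match lookup in the association list (exact for dicts; KeyError inputs are outside Pre_)
def pvPath (c : List (String × String)) : String :=
  (((c.find? (fun kv => kv.1 == "path")).map Prod.snd).getD "")

def score_from_changes (changed : List (List (String × String))) : Int :=
  let score : Int := 70
  let paths := changed.map (fun c => pvPath c)
  let score := if paths.any (fun p => PySem.Str.isIn "/lore/" p) then score + 6 else score
  let score := if paths.any (fun p => PySem.Str.isIn "/images" p) then score + 6 else score
  let score := if paths.any (fun p => PySem.Str.isIn "/dist" p) then score + 4 else score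
  min score 92

-- ===== PORT B =====
def pvRules : List (String × Int) := [("/lore/", 6), ("/images", 6), ("/dist", 4)]

-- the 'for c in changed: … if len(matched) == len(RULES): break' loop
def pvLoop : List (List (String × String)) → PySem.Set String → PySem.Set String
  | [], matched => matched
  | c :: rest, matched =>
    let p := pvPath c
    let matched := pvRules.foldl
      (fun (s : PySem.Set String) r => if PySem.Str.isIn r.1 p then PySem.Set.add s r.1 else s)
      matched
    if PySem.Set.len matched == (pvRules.length : Int) then matched else pvLoop rest matched

def score_from_changes_alt (changed : List (List (String × String))) : Int :=
  let matched := pvLoop changed PySem.Set.empty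
  min (70 + pvRules.foldl
        (fun (acc : Int) r => if PySem.Set.contains matched r.1 then acc + r.2 else acc) 0) 92

-- ===== PRECONDITION & SPEC =====
-- Pre_ excludes exactly the inputs where Python raises KeyError: some dict lacks the key "path".
def Pre_score_from_changes (changed : List (List (String × String))) : Prop :=
  (changed.all (fun c => c.any (fun kv => kv.1 == "path"))) = true
instance (changed : List (List (String × String))) : Decidable (Pre_score_from_changes changed) := by unfold Pre_score_from_changes; infer_instance

def pvWitness_score_from_changes : (List (List (String × String))) := [[("path", "/lore/a.md")]]

def Spec_score_from_changes (changed : List (List (String × String))) (out : Int) : Prop := out = score_from_changes_alt changed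
instance (changed : List (List (String × String))) (out : Int) : Decidable (Spec_score_from_changes changed out) := by unfold Spec_score_from_changes; infer_instance

-- ===== CLAIM =====
def Claim_equal_score_from_changes : Prop := ∀ (changed : List (List (String × String))), Dom_score_from_changes changed → Pre_score_from_changes changed → Spec_score_from_changes changed (score_from_changes changed)

-- ===== LEMMAS AND PROOFS =====

-- proof-side name for the inner fold over the rule table (one element of changed)
def pvStep (m : PySem.Set String) (p : String) : PySem.Set String :=
  pvRules.foldl (fun (s : PySem.Set String) r => if PySem.Str.isIn r.1 p then PySem.Set.add s r.1 else s) m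

lemma pvLoop_cons (c : List (String × String)) (rest : List (List (String × String)))
    (m : PySem.Set String) :
    pvLoop (c :: rest) m
      = if PySem.Set.len (pvStep m (pvPath c)) == (pvRules.length : Int)
        then pvStep m (pvPath c) else pvLoop rest (pvStep m (pvPath c)) := rfl

lemma pv_mem_condAdd (s : PySem.Set String) (b : Bool) (x y : String) :
    y ∈ (if b then PySem.Set.add s x else s) ↔ (y ∈ s ∨ (b = true ∧ y = x)) := by
  cases b <;> simp [PySem.Set.mem_add]

lemma pv_nodup_condAdd (s : PySem.Set String) (b : Bool) (x : String) (h : s.Nodup) :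
    (if b then PySem.Set.add s x else s).Nodup := by
  cases b <;> [exact h; exact PySem.Set.nodup_add s x h]

lemma pv_mem_pvStep (m : PySem.Set String) (p y : String) :
    y ∈ pvStep m p ↔ (y ∈ m ∨
      (PySem.Str.isIn "/lore/" p = true ∧ y = "/lore/") ∨
      (PySem.Str.isIn "/images" p = true ∧ y = "/images") ∨
      (PySem.Str.isIn "/dist" p = true ∧ y = "/dist")) := by
  simp only [pvStep, pvRules, List.foldl_cons, List.foldl_nil]
  rw [pv_mem_condAdd, pv_mem_condAdd, pv_mem_condAdd]
  tauto

lemma pv_nodup_pvStep (m : PySem.Set String) (p : String) (h : m.Nodup) :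
    (pvStep m p).Nodup := by
  simp only [pvStep, pvRules, List.foldl_cons, List.foldl_nil]
  exact pv_nodup_condAdd _ _ _ (pv_nodup_condAdd _ _ _ (pv_nodup_condAdd _ _ _ h))

-- membership in the loop's result, for the rule substrings, given the accumulator only holds rule substrings
lemma pv_loop_mem (changed : List (List (String × String))) (m : PySem.Set String)
    (hN : m.Nodup) (hE : ∀ x ∈ m, x = "/lore/" ∨ x = "/images" ∨ x = "/dist")
    (sub : String) (hsub : sub = "/lore/" ∨ sub = "/images" ∨ sub = "/dist") :
    (sub ∈ pvLoop changed m)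
      ↔ (sub ∈ m ∨ changed.any (fun c => PySem.Str.isIn sub (pvPath c)) = true) := by
  induction changed generalizing m with
  | nil => simp [pvLoop]
  | cons c rest ih =>
    rw [pvLoop_cons]
    have hN3 : (pvStep m (pvPath c)).Nodup := pv_nodup_pvStep m (pvPath c) hN
    have hE3 : ∀ x ∈ pvStep m (pvPath c), x = "/lore/" ∨ x = "/images" ∨ x = "/dist" := by
      intro x hx
      rcases (pv_mem_pvStep m (pvPath c) x).mp hx with h | ⟨_, h⟩ | ⟨_, h⟩ | ⟨_, h⟩
      · exact hE x h
      all_goals simp [h]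
    have hmem3 : sub ∈ pvStep m (pvPath c) ↔ (sub ∈ m ∨ PySem.Str.isIn sub (pvPath c) = true) := by
      rw [pv_mem_pvStep]
      rcases hsub with h | h | h <;> subst h
      · have d1 : ¬(("/lore/" : String) = "/images") := by decide
        have d2 : ¬(("/lore/" : String) = "/dist") := by decide
        tauto
      · have d1 : ¬(("/images" : String) = "/lore/") := by decide
        have d2 : ¬(("/images" : String) = "/dist") := by decide
        tauto
      · have d1 : ¬(("/dist" : String) = "/lore/") := by decide
        have d2 : ¬(("/dist" : String) = "/images") := by decide
        tauto
    split
    · rename_i hlen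
      have hlen3 : (pvStep m (pvPath c)).length = 3 := by
        simp only [PySem.Set.len, beq_iff_eq, pvRules, List.length_cons, List.length_nil] at hlen
        exact_mod_cast hlen
      have hsubset : pvStep m (pvPath c) ⊆ ["/lore/", "/images", "/dist"] := by
        intro x hx
        rcases hE3 x hx with h | h | h <;> simp [h]
      have hperm : (pvStep m (pvPath c)).Perm ["/lore/", "/images", "/dist"] :=
        (hN3.subperm hsubset).perm_of_length_le (by simp [hlen3])
      have hin : sub ∈ pvStep m (pvPath c) := by
        rw [hperm.mem_iff]
        rcases hsub with h | h | h <;> simp [h]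
      have hmp := hmem3.mp hin
      simp only [List.any_cons, Bool.or_eq_true]
      constructor
      · intro _
        rcases hmp with h | h
        · exact Or.inl h
        · exact Or.inr (Or.inl h)
      · intro _
        exact hin
    · rw [ih (pvStep m (pvPath c)) hN3 hE3, hmem3]
      simp only [List.any_cons, Bool.or_eq_true]
      exact or_assoc

-- ===== VERDICT =====
theorem score_from_changes_spec : Claim_equal_score_from_changes := by
  intro changed _ _
  unfold Spec_score_from_changes score_from_changes score_from_changes_alt
  have key : ∀ sub, (sub = "/lore/" ∨ sub = "/images" ∨ sub = "/dist") →
      PySem.Set.contains (pvLoop changed PySem.Set.empty) sub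
        = changed.any (fun c => PySem.Str.isIn sub (pvPath c)) := by
    intro sub hsub
    rw [Bool.eq_iff_iff, PySem.Set.contains_iff,
        pv_loop_mem changed PySem.Set.empty (by simp [PySem.Set.empty]) (by simp [PySem.Set.empty]) sub hsub]
    simp [PySem.Set.empty]
  simp only [pvRules, List.foldl_cons, List.foldl_nil,
    key "/lore/" (by tauto), key "/images" (by tauto), key "/dist" (by tauto),
    List.any_map, Function.comp_def]
  rcases changed.any (fun c => PySem.Str.isIn "/lore/" (pvPath c)) <;>
  rcases changed.any (fun c => PySem.Str.isIn "/images" (pvPath c)) <;>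
  rcases changed.any (fun c => PySem.Str.isIn "/dist" (pvPath c)) <;>
  simp
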